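-- pv_equiv track=rewrite | github.com/SNURFER/PAI | python/programmers/30_60059.py | getHomRange
-- ===== SOURCE A (Python) =====
-- from typing import List
--
-- def getHomRange(lock: List[List[int]]) -> List[int]:
--     hom_x: List[int] = []
--     hom_y: List[int] = []
--
--     for i in range(len(lock)):
--         for j in range(len(lock)):
--             if lock[i][j] == 0:
--                 hom_x.append(i)
--                 hom_y.append(j)
--
--     return [[min(hom_x), min(hom_y)], [max(hom_x), max(hom_y)]]
-- ===== SOURCE B (Python) =====
-- from typing import List
--
-- def getHomRange(lock: List[List[int]]) -> List[int]:
--     n = len(lock)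
--     hit = [i for i in range(n) if 0 in lock[i][:n]]
--     y_min = min(lock[i][:n].index(0) for i in hit)
--     y_max = max(n - 1 - list(reversed(lock[i][:n])).index(0) for i in hit)
--     return [[hit[0], y_min], [hit[-1], y_max]]
-- ===== Notes on version B (the rewrite author's own statement) =====
-- stated objective: alternative
-- what changed: B replaces A's collect-all-zero-coordinates-then-min/max reduction by a row-decomposed computation: it finds the rows that contain a zero via slice membership, takes the first/last such row for the x-range, and gets the y-range from the first/last zero position within each hit row via .index on the row and on its reversal; Pre_ excludes exactly the inputs where A raises (a row shorter than len(lock) gives IndexError, no zero in the square gives ValueError).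
import Mathlib
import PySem

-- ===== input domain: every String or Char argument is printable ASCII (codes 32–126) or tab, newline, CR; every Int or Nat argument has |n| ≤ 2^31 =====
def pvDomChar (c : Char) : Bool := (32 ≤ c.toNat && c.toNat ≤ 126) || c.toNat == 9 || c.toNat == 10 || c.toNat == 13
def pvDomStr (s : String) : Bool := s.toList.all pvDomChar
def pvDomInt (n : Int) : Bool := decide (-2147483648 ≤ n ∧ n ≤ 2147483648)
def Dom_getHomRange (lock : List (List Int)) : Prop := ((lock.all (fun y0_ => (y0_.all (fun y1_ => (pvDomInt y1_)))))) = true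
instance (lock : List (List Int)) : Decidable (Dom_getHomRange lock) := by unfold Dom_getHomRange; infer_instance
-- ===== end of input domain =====

-- B decomposes the bounding-box computation by rows (first/last hit row, first/last zero
-- position inside the hit rows) instead of A's collect-all-coordinates-then-min/max reduction.

-- ===== PORT A =====
def getHomRange (lock : List (List Int)) : List (List Int) :=
  let p := (PySem.List.pyRange 0 (lock.length : Int) 1).foldl
    (fun (acc : List Int × List Int) i =>
      (PySem.List.pyRange 0 (lock.length : Int) 1).foldl
        (fun (acc : List Int × List Int) j =>
          if PySem.List.pyGetD (PySem.List.pyGetD lock i []) j 1 = 0 then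
            (acc.1 ++ [i], acc.2 ++ [j])
          else acc) acc) ([], [])
  [[(PySem.List.min? p.1 (fun y => y)).getD 0, (PySem.List.min? p.2 (fun y => y)).getD 0],
   [(PySem.List.max? p.1 (fun y => y)).getD 0, (PySem.List.max? p.2 (fun y => y)).getD 0]]

-- ===== PORT B =====
def getHomRange_alt (lock : List (List Int)) : List (List Int) :=
  let n : Int := lock.length
  let hit := (PySem.List.pyRange 0 n 1).filter
      (fun i => (PySem.List.slice (PySem.List.pyGetD lock i []) none (some n)).contains 0)
  let yMin := (PySem.List.min? (hit.map (fun i =>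
      (((PySem.List.index? (PySem.List.slice (PySem.List.pyGetD lock i []) none (some n)) 0).getD 0 : Nat) : Int))) (fun y => y)).getD 0
  let yMax := (PySem.List.max? (hit.map (fun i =>
      n - 1 - (((PySem.List.index? (PySem.List.slice (PySem.List.pyGetD lock i []) none (some n)).reverse 0).getD 0 : Nat) : Int))) (fun y => y)).getD 0
  [[PySem.List.pyGetD hit 0 0, yMin], [PySem.List.pyGetD hit (-1) 0, yMax]]

-- ===== PRECONDITION & SPEC =====
-- Pre_ excludes exactly the inputs where A raises: a row shorter than len(lock) (IndexError),
-- or no zero cell in the len(lock)×len(lock) square (ValueError from min of an empty list).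
def Pre_getHomRange (lock : List (List Int)) : Prop :=
  (∀ row ∈ lock, lock.length ≤ row.length) ∧ (∃ row ∈ lock, (0 : Int) ∈ row.take lock.length)
instance (lock : List (List Int)) : Decidable (Pre_getHomRange lock) := by
  unfold Pre_getHomRange; infer_instance
def pvWitness_getHomRange : List (List Int) := [[0]]
def Spec_getHomRange (lock : List (List Int)) (out : List (List Int)) : Prop := out = getHomRange_alt lock
instance (lock : List (List Int)) (out : List (List Int)) : Decidable (Spec_getHomRange lock out) := by unfold Spec_getHomRange; infer_instance

-- ===== CLAIM (what is proved, stated in full; the proofs are below) =====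
def Claim_equal_getHomRange : Prop := ∀ (lock : List (List Int)), Dom_getHomRange lock → Pre_getHomRange lock → Spec_getHomRange lock (getHomRange lock)

-- ===== LEMMAS AND PROOFS =====
def pvZ (lock : List (List Int)) (i : Int) : List Int :=
  (PySem.List.pyRange 0 (lock.length : Int) 1).filter
    (fun j => decide (PySem.List.pyGetD (PySem.List.pyGetD lock i []) j 1 = 0))

theorem pv_mem_zs (lock : List (List Int)) (i x : Int) :
    x ∈ pvZ lock i ↔ (0 ≤ x ∧ x < (lock.length : Int) ∧
      PySem.List.pyGetD (PySem.List.pyGetD lock i []) x 1 = 0) := by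
  simp [pvZ, List.mem_filter, PySem.List.mem_pyRange_one]
  tauto

theorem pv_zs_ne (lock : List (List Int)) (k : Nat)
    (hrow : lock.length ≤ (lock.getD k []).length) :
    (pvZ lock (k : Int) ≠ [] ↔ (0 : Int) ∈ (lock.getD k []).take lock.length) := by
  constructor
  · intro h
    obtain ⟨x, hx⟩ := List.exists_mem_of_ne_nil _ h
    rw [pv_mem_zs] at hx
    obtain ⟨h0, h1, h2⟩ := hx
    obtain ⟨m, rfl⟩ : ∃ m : Nat, x = (m : Int) := ⟨x.toNat, by omega⟩
    have hrow2 : lock.length ≤ (lock[k]?.getD []).length := hrow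
    have hm : m < lock.length := by exact_mod_cast h1
    rw [PySem.List.pyGetD_natCast, PySem.List.pyGetD_natCast] at h2
    rw [List.getD_eq_getElem _ _ (by omega : m < (lock.getD k []).length)] at h2
    rw [List.mem_iff_getElem]
    refine ⟨m, by simp [List.length_take]; omega, ?_⟩
    rw [List.getElem_take]
    exact h2
  · intro h
    rw [List.mem_iff_getElem] at h
    obtain ⟨m, hm, hv⟩ := h
    have hmn : m < lock.length := by simp [List.length_take] at hm; omega
    rw [List.getElem_take] at hv
    intro hnil
    have : ((m : Nat) : Int) ∈ pvZ lock (k : Int) := by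
      rw [pv_mem_zs]
      refine ⟨by omega, by omega, ?_⟩
      rw [PySem.List.pyGetD_natCast, PySem.List.pyGetD_natCast,
        List.getD_eq_getElem _ _ (by omega : m < (lock.getD k []).length)]
      exact hv
    rw [hnil] at this
    simp at this

-- first zero position in row k: index? of the truncated row
theorem pv_fmin (row : List Int) (n : Nat) (hn : n ≤ row.length) (hz : (0:Int) ∈ row.take n) :
    ∃ j : Nat, PySem.List.index? (row.take n) 0 = some j ∧ j < n ∧ row.getD j 1 = 0 ∧
      ∀ m : Nat, m < n → row.getD m 1 = 0 → j ≤ m := by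
  have hs : (PySem.List.index? (row.take n) 0).isSome := by
    rw [PySem.List.index?_isSome_iff]; exact hz
  obtain ⟨j, hj⟩ := Option.isSome_iff_exists.mp hs
  obtain ⟨hjl, hjv, hjf⟩ := PySem.List.getElem_of_index?_eq_some hj
  have hln : (row.take n).length = n := by simp [List.length_take]; omega
  have hjn : j < n := by omega
  refine ⟨j, hj, hjn, ?_, ?_⟩
  · rw [List.getD_eq_getElem _ _ (by omega : j < row.length)]
    rw [List.getElem_take] at hjv
    exact hjv
  · intro m hm hv
    by_contra hlt
    have hmj : m < j := by omega
    apply hjf m (by omega)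
    rw [List.getElem_take]
    rw [List.getD_eq_getElem _ _ (by omega : m < row.length)] at hv
    exact hv

-- last zero position in row k: index? of the reversed truncated row
theorem pv_fmax (row : List Int) (n : Nat) (hn : n ≤ row.length) (hz : (0:Int) ∈ row.take n) :
    ∃ j : Nat, PySem.List.index? (row.take n).reverse 0 = some j ∧ j < n ∧
      row.getD (n - 1 - j) 1 = 0 ∧
      ∀ m : Nat, m < n → row.getD m 1 = 0 → m ≤ n - 1 - j := by
  have hs : (PySem.List.index? (row.take n).reverse 0).isSome := by
    rw [PySem.List.index?_isSome_iff, List.mem_reverse]; exact hz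
  obtain ⟨j, hj⟩ := Option.isSome_iff_exists.mp hs
  obtain ⟨hjl, hjv, hjf⟩ := PySem.List.getElem_of_index?_eq_some hj
  have hln : (row.take n).length = n := by simp [List.length_take]; omega
  have hjn : j < n := by simp [hln] at hjl; omega
  refine ⟨j, hj, hjn, ?_, ?_⟩
  · rw [List.getElem_reverse, List.getElem_take] at hjv
    rw [List.getD_eq_getElem _ _ (by omega : n - 1 - j < row.length)]
    convert hjv using 2
    omega
  · intro m hm hv
    by_contra hgt
    have hmgt : n - 1 - j < m := by omega
    apply hjf (n - 1 - m) (by omega)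
    rw [List.getElem_reverse, List.getElem_take]
    rw [List.getD_eq_getElem _ _ (by omega : m < row.length)] at hv
    convert hv using 2
    omega
theorem pv_fold_inner (c : Int → Int → Prop) [inst : ∀ i j, Decidable (c i j)] (i : Int) :
    ∀ (M : List Int) (u v : List Int),
    M.foldl (fun (acc : List Int × List Int) j =>
        if c i j then (acc.1 ++ [i], acc.2 ++ [j]) else acc) (u, v)
    = (u ++ (M.filter (fun j => decide (c i j))).map (fun _ => i),
       v ++ M.filter (fun j => decide (c i j))) := by
  intro M
  induction M with
  | nil => intro u v; simp
  | cons j M ih =>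
    intro u v
    simp only [List.foldl_cons, List.filter_cons]
    by_cases hc : c i j
    · simp only [if_pos hc, decide_eq_true hc]
      rw [ih (u ++ [i]) (v ++ [j])]
      simp
    · simp only [if_neg hc, decide_eq_false hc]
      exact ih u v

-- whole double loop of A: the two coordinate lists in flatMap form
theorem pv_fold_flat (c : Int → Int → Prop) [inst : ∀ i j, Decidable (c i j)] (M : List Int) :
    ∀ (L : List Int) (u v : List Int),
    L.foldl (fun (acc : List Int × List Int) i =>
        M.foldl (fun (acc : List Int × List Int) j =>
          if c i j then (acc.1 ++ [i], acc.2 ++ [j]) else acc) acc) (u, v)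
    = (u ++ L.flatMap (fun i => ((M.filter (fun j => decide (c i j))).map (fun _ => i))),
       v ++ L.flatMap (fun i => M.filter (fun j => decide (c i j)))) := by
  intro L
  induction L with
  | nil => intro u v; simp
  | cons i L ih =>
    intro u v
    simp only [List.foldl_cons]
    rw [pv_fold_inner c i M u v, ih]
    simp

-- min(xs) / max(xs) characterized by membership + extremality
theorem pv_min?_char (xs : List Int) (m : Int) (hm : m ∈ xs) (hall : ∀ y ∈ xs, m ≤ y) :
    PySem.List.min? xs (fun y => y) = some m := by
  cases h : PySem.List.min? xs (fun y => y) with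
  | none =>
    rw [PySem.List.min?_eq_none_iff] at h
    subst h; simp at hm
  | some m' =>
    have h1 := PySem.List.min?_mem h
    have h2 := PySem.List.min?_isMin h m hm
    have h3 := hall m' h1
    simp only [Option.some.injEq]
    simp at h2
    omega

theorem pv_max?_char (xs : List Int) (m : Int) (hm : m ∈ xs) (hall : ∀ y ∈ xs, y ≤ m) :
    PySem.List.max? xs (fun y => y) = some m := by
  cases h : PySem.List.max? xs (fun y => y) with
  | none =>
    rw [PySem.List.max?_eq_none_iff] at h
    subst h; simp at hm
  | some m' =>
    have h1 := PySem.List.max?_mem h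
    have h2 := PySem.List.max?_isMax h m hm
    have h3 := hall m' h1
    simp only [Option.some.injEq]
    simp at h2
    omega

-- last element of a strictly increasing list bounds it above
theorem pv_getLast_max (l : List Int) (h : l ≠ []) (hp : l.Pairwise (· < ·)) :
    ∀ y ∈ l, y ≤ l.getLast h := by
  induction l with
  | nil => simp at h
  | cons a t ih =>
    intro y hy
    cases t with
    | nil => simp at hy; simp [hy]
    | cons b t' =>
      rw [List.getLast_cons (by simp)]
      rcases List.mem_cons.mp hy with rfl | hy'
      · have hb : y < (b :: t').getLast (by simp) := by
          exact (List.pairwise_cons.mp hp).1 _ (List.getLast_mem _)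
        omega
      · exact ih (by simp) (List.pairwise_cons.mp hp).2 y hy'

theorem pv_head_min (a : Int) (t : List Int) (hp : (a :: t).Pairwise (· < ·)) :
    ∀ y ∈ a :: t, a ≤ y := by
  intro y hy
  rcases List.mem_cons.mp hy with rfl | hy'
  · omega
  · have := (List.pairwise_cons.mp hp).1 y hy'
    omega
theorem pvZ_def (lock : List (List Int)) (i : Int) :
    (PySem.List.pyRange 0 (lock.length : Int) 1).filter
      (fun j => decide (PySem.List.pyGetD (PySem.List.pyGetD lock i []) j 1 = 0)) = pvZ lock i := rfl

theorem pv_AB_eq : ∀ (lock : List (List Int)), Pre_getHomRange lock → Spec_getHomRange lock (getHomRange lock) := by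
  intro lock hpre
  obtain ⟨hlen, hzex⟩ := hpre
  unfold Spec_getHomRange getHomRange getHomRange_alt
  simp only [pv_fold_flat (fun i j => PySem.List.pyGetD (PySem.List.pyGetD lock i []) j 1 = 0),
    List.nil_append, pvZ_def]
  set n := lock.length with hn
  set R := PySem.List.pyRange 0 (n : Int) 1 with hR
  set hit := R.filter (fun i => (PySem.List.slice (PySem.List.pyGetD lock i []) none (some (n : Int))).contains 0) with hhit
  -- row access and slice normalisation
  have hrowlen : ∀ k : Nat, k < n → n ≤ (lock.getD k []).length := by
    intro k hk
    have hmem : lock.getD k [] ∈ lock := by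
      rw [List.getD_eq_getElem _ _ hk]; exact List.getElem_mem _
    exact hlen _ hmem
  have hslice : ∀ k : Nat, PySem.List.slice (PySem.List.pyGetD lock (k : Int) []) none (some (n : Int))
      = (lock.getD k []).take n := by
    intro k
    rw [PySem.List.pyGetD_natCast, PySem.List.slice_to _ (by omega : (0:Int) ≤ (n:Int))]
    simp
  have hmemhit : ∀ k : Nat, k < n → (((k : Nat) : Int) ∈ hit ↔ (0 : Int) ∈ (lock.getD k []).take n) := by
    intro k hk
    rw [hhit]
    simp only [List.mem_filter]
    rw [hslice k]
    constructor
    · intro ⟨_, h2⟩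
      simpa using h2
    · intro h
      refine ⟨?_, by simpa using h⟩
      rw [hR, PySem.List.mem_pyRange_one]; constructor <;> omega
  have hmemI : ∀ i ∈ hit, ∃ k : Nat, k < n ∧ i = (k : Int) ∧ (0 : Int) ∈ (lock.getD k []).take n := by
    intro i hi
    rw [hhit] at hi
    simp only [List.mem_filter] at hi
    obtain ⟨hiR, h2⟩ := hi
    rw [hR, PySem.List.mem_pyRange_one] at hiR
    obtain ⟨h0, h1⟩ := hiR
    refine ⟨i.toNat, by omega, by omega, ?_⟩
    have hi2 : i = ((i.toNat : Nat) : Int) := by omega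
    rw [hi2, hslice i.toNat] at h2
    simpa using h2
  have hpairR : R.Pairwise (· < ·) := by rw [hR]; exact PySem.List.pairwise_lt_pyRange_one 0 (n : Int)
  have hpair : hit.Pairwise (· < ·) := by rw [hhit]; exact List.Pairwise.filter _ hpairR
  -- hit is nonempty
  obtain ⟨row0, hrow0, hz0⟩ := hzex
  obtain ⟨k0, hk0, hk0v⟩ := List.getElem_of_mem hrow0
  have hk0hit : ((k0 : Nat) : Int) ∈ hit := by
    rw [hmemhit k0 hk0, List.getD_eq_getElem _ _ hk0, hk0v]; exact hz0
  have hne : hit ≠ [] := List.ne_nil_of_mem hk0hit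
  -- zs i nonempty exactly on hit (for range indices)
  have hzs_ne : ∀ k : Nat, k < n → (pvZ lock (k : Int) ≠ [] ↔ (0:Int) ∈ (lock.getD k []).take n) := by
    intro k hk
    exact pv_zs_ne lock k (hrowlen k hk)
  have hmemR : ∀ k : Nat, k < n → ((k : Int) ∈ R) := by
    intro k hk; rw [hR, PySem.List.mem_pyRange_one]; constructor <;> omega
  -- zs membership outside the range is empty
  have hZsub : ∀ i : Int, i ∈ R → (pvZ lock i ≠ [] → i ∈ hit) := by
    intro i hiR hni
    rw [hR, PySem.List.mem_pyRange_one] at hiR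
    obtain ⟨k, rfl⟩ : ∃ k : Nat, i = (k : Int) := ⟨i.toNat, by omega⟩
    have hk : k < n := by omega
    rw [hmemhit k hk]
    exact (hzs_ne k hk).mp hni
  have hhitsub : ∀ i ∈ hit, i ∈ R ∧ pvZ lock i ≠ [] := by
    intro i hi
    obtain ⟨k, hk, rfl, h0⟩ := hmemI i hi
    exact ⟨hmemR k hk, (hzs_ne k hk).mpr h0⟩
  -- head and last of hit
  obtain ⟨a, t, hat⟩ := List.exists_cons_of_ne_nil hne
  have hamem : a ∈ hit := by rw [hat]; exact List.mem_cons_self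
  have hamin : ∀ y ∈ hit, a ≤ y := by rw [hat]; exact pv_head_min a t (hat ▸ hpair)
  obtain ⟨bl, hbl⟩ : ∃ b, hit.getLast hne = b := ⟨_, rfl⟩
  have hlmem : bl ∈ hit := hbl ▸ List.getLast_mem hne
  have hlmax : ∀ y ∈ hit, y ≤ bl := hbl ▸ pv_getLast_max hit hne hpair
  -- (C3) min of A's x-list is the first hit row
  have hminx : PySem.List.min? (R.flatMap (fun i => (pvZ lock i).map (fun _ => i))) (fun y => y) = some a := by
    apply pv_min?_char
    · obtain ⟨hiR, hzne⟩ := hhitsub a hamem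
      obtain ⟨x, hx⟩ := List.exists_mem_of_ne_nil _ hzne
      exact List.mem_flatMap.mpr ⟨a, hiR, List.mem_map.mpr ⟨x, hx, rfl⟩⟩
    · intro y hy
      obtain ⟨i, hiR, hyi⟩ := List.mem_flatMap.mp hy
      obtain ⟨x, hx, rfl⟩ := List.mem_map.mp hyi
      exact hamin i (hZsub i hiR (List.ne_nil_of_mem hx))
  -- (C4) max of A's x-list is the last hit row
  have hmaxx : PySem.List.max? (R.flatMap (fun i => (pvZ lock i).map (fun _ => i))) (fun y => y) = some bl := by
    apply pv_max?_char
    · obtain ⟨hiR, hzne⟩ := hhitsub _ hlmem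
      obtain ⟨x, hx⟩ := List.exists_mem_of_ne_nil _ hzne
      exact List.mem_flatMap.mpr ⟨_, hiR, List.mem_map.mpr ⟨x, hx, rfl⟩⟩
    · intro y hy
      obtain ⟨i, hiR, hyi⟩ := List.mem_flatMap.mp hy
      obtain ⟨x, hx, rfl⟩ := List.mem_map.mp hyi
      exact hlmax i (hZsub i hiR (List.ne_nil_of_mem hx))
  -- B's per-row first/last zero functions
  set fB := (fun i : Int => (((PySem.List.index? (PySem.List.slice (PySem.List.pyGetD lock i []) none (some (n:Int))) 0).getD 0 : Nat) : Int)) with hfB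
  set gB := (fun i : Int => (n : Int) - 1 - (((PySem.List.index? (PySem.List.slice (PySem.List.pyGetD lock i []) none (some (n:Int))).reverse 0).getD 0 : Nat) : Int)) with hgB
  -- fB at a hit row is a zero column of that row, and the least one
  have hfB_props : ∀ k : Nat, k < n → (0:Int) ∈ (lock.getD k []).take n →
      fB (k : Int) ∈ pvZ lock (k : Int) ∧ ∀ y ∈ pvZ lock (k : Int), fB (k : Int) ≤ y := by
    intro k hk h0
    obtain ⟨j, hj, hjn, hjv, hjmin⟩ := pv_fmin (lock.getD k []) n (hrowlen k hk) h0
    have hfBv : fB (k : Int) = (j : Int) := by rw [hfB]; simp only []; rw [hslice k, hj]; simp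
    constructor
    · rw [hfBv, pv_mem_zs]
      refine ⟨by omega, by omega, ?_⟩
      rw [PySem.List.pyGetD_natCast, PySem.List.pyGetD_natCast]
      exact hjv
    · intro y hy
      rw [pv_mem_zs] at hy
      obtain ⟨hy0, hy1, hy2⟩ := hy
      obtain ⟨m, rfl⟩ : ∃ m : Nat, y = (m : Int) := ⟨y.toNat, by omega⟩
      rw [PySem.List.pyGetD_natCast, PySem.List.pyGetD_natCast] at hy2
      have := hjmin m (by omega) hy2
      rw [hfBv]; omega
  have hgB_props : ∀ k : Nat, k < n → (0:Int) ∈ (lock.getD k []).take n →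
      gB (k : Int) ∈ pvZ lock (k : Int) ∧ ∀ y ∈ pvZ lock (k : Int), y ≤ gB (k : Int) := by
    intro k hk h0
    obtain ⟨j, hj, hjn, hjv, hjmax⟩ := pv_fmax (lock.getD k []) n (hrowlen k hk) h0
    have hgBv : gB (k : Int) = ((n - 1 - j : Nat) : Int) := by
      rw [hgB]; simp only []; rw [hslice k, hj]; simp; omega
    constructor
    · rw [hgBv, pv_mem_zs]
      refine ⟨by omega, by omega, ?_⟩
      rw [PySem.List.pyGetD_natCast, PySem.List.pyGetD_natCast]
      exact hjv
    · intro y hy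
      rw [pv_mem_zs] at hy
      obtain ⟨hy0, hy1, hy2⟩ := hy
      obtain ⟨m, rfl⟩ : ∃ m : Nat, y = (m : Int) := ⟨y.toNat, by omega⟩
      rw [PySem.List.pyGetD_natCast, PySem.List.pyGetD_natCast] at hy2
      have := hjmax m (by omega) hy2
      rw [hgBv]; omega
  -- (C5) the y-minimum: A's reduction and B's reduction produce the same some-value
  have hmlist_ne : hit.map fB ≠ [] := by simp [hne]
  obtain ⟨mY, hmY⟩ : ∃ mY, PySem.List.min? (hit.map fB) (fun y => y) = some mY := by
    cases h : PySem.List.min? (hit.map fB) (fun y => y) with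
    | none => rw [PySem.List.min?_eq_none_iff] at h; exact absurd h hmlist_ne
    | some m => exact ⟨m, rfl⟩
  have hminy : PySem.List.min? (R.flatMap (fun i => pvZ lock i)) (fun y => y) = some mY := by
    apply pv_min?_char
    · obtain ⟨x, hx, hxe⟩ := List.mem_map.mp (PySem.List.min?_mem hmY)
      obtain ⟨k, hk, rfl, h0⟩ := hmemI x hx
      obtain ⟨hmem, _⟩ := hfB_props k hk h0
      rw [← hxe]
      exact List.mem_flatMap.mpr ⟨_, (hhitsub _ hx).1, hmem⟩
    · intro y hy
      obtain ⟨i, hiR, hyi⟩ := List.mem_flatMap.mp hy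
      have hihit : i ∈ hit := hZsub i hiR (List.ne_nil_of_mem hyi)
      obtain ⟨k, hk, rfl, h0⟩ := hmemI i hihit
      obtain ⟨_, hmin⟩ := hfB_props k hk h0
      have h1 : mY ≤ fB (k : Int) := by
        have := PySem.List.min?_isMin hmY (fB (k:Int)) (List.mem_map.mpr ⟨_, hihit, rfl⟩)
        simpa using this
      exact le_trans h1 (hmin y hyi)
  -- (C6) the y-maximum likewise
  have hMlist_ne : hit.map gB ≠ [] := by simp [hne]
  obtain ⟨MY, hMY⟩ : ∃ MY, PySem.List.max? (hit.map gB) (fun y => y) = some MY := by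
    cases h : PySem.List.max? (hit.map gB) (fun y => y) with
    | none => rw [PySem.List.max?_eq_none_iff] at h; exact absurd h hMlist_ne
    | some m => exact ⟨m, rfl⟩
  have hmaxy : PySem.List.max? (R.flatMap (fun i => pvZ lock i)) (fun y => y) = some MY := by
    apply pv_max?_char
    · obtain ⟨x, hx, hxe⟩ := List.mem_map.mp (PySem.List.max?_mem hMY)
      obtain ⟨k, hk, rfl, h0⟩ := hmemI x hx
      obtain ⟨hmem, _⟩ := hgB_props k hk h0
      rw [← hxe]
      exact List.mem_flatMap.mpr ⟨_, (hhitsub _ hx).1, hmem⟩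
    · intro y hy
      obtain ⟨i, hiR, hyi⟩ := List.mem_flatMap.mp hy
      have hihit : i ∈ hit := hZsub i hiR (List.ne_nil_of_mem hyi)
      obtain ⟨k, hk, rfl, h0⟩ := hmemI i hihit
      obtain ⟨_, hmax⟩ := hgB_props k hk h0
      have h1 : gB (k : Int) ≤ MY := by
        have := PySem.List.max?_isMax hMY (gB (k:Int)) (List.mem_map.mpr ⟨_, hihit, rfl⟩)
        simpa using this
      exact le_trans (hmax y hyi) h1
  -- assemble the four components
  have hC1 : PySem.List.pyGetD hit 0 0 = a := by rw [hat, PySem.List.pyGetD_zero_cons]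
  have hC2 : PySem.List.pyGetD hit (-1) 0 = bl := by rw [PySem.List.pyGetD_neg_one hit 0 hne, hbl]
  rw [hminx, hmaxx, hminy, hmaxy, hmY, hMY, hC1, hC2]
  simp

-- ===== VERDICT (by name: the statement is the Claim_ definition above) =====
theorem getHomRange_spec : Claim_equal_getHomRange := by
  intro lock _ hpre
  exact pv_AB_eq lock hpre
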